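-- pv_equiv track=rewrite | github.com/philmade/pydantic_scrape | pydantic_scrape/toolsets/playwright_toolset.py | _filter_content_by_search_terms
-- ===== SOURCE A (Python) =====
-- from typing import Dict, List, Optional, Set
--
-- def _filter_content_by_search_terms(content: str, search_terms: List[str], context_lines: int = 2) -> str:
--     """
--     Filter content to only include sections relevant to search terms.
--     This replicates Chawan's search_with_context functionality.
--
--     Args:
--         content: Full markdown content
--         search_terms: List of terms to search for
--         context_lines: Number of lines of context around matches
--
--     Returns:
--         Filtered content containing only relevant sections
--     """
--     if not search_terms:
--         return content
--
--     lines = content.split('\n')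
--     relevant_lines = set()
--
--     # Find lines containing search terms (case insensitive)
--     for i, line in enumerate(lines):
--         for term in search_terms:
--             if term.lower() in line.lower():
--                 # Add the matching line and context around it
--                 start = max(0, i - context_lines)
--                 end = min(len(lines), i + context_lines + 1)
--                 relevant_lines.update(range(start, end))
--                 break
--
--     if not relevant_lines:
--         # No matches found - return summary instead of empty content
--         return f"No direct matches found for: {', '.join(search_terms)}\n\nPage summary (first 500 chars):\n{content[:500]}..."
--
--     # Sort line numbers and reconstruct content
--     sorted_lines = sorted(relevant_lines)
--     filtered_content = []
--
--     prev_line = -1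
--     for line_num in sorted_lines:
--         # Add separator for gaps in content
--         if line_num > prev_line + 1:
--             filtered_content.append("\n[...content omitted...]\n")
--         filtered_content.append(lines[line_num])
--         prev_line = line_num
--
--     return '\n'.join(filtered_content)
-- ===== SOURCE B (Python) =====
-- from typing import List
--
-- def _filter_content_by_search_terms(content: str, search_terms: List[str], context_lines: int = 2) -> str:
--     """Interval-merge reconstruction: map each matching line to a clamped context
--     interval, merge overlapping-or-touching intervals in one pass (starts are
--     already nondecreasing), then emit each merged range as a slice with an
--     omission marker before every gap."""
--     if not search_terms:
--         return content
--
--     lines = content.split('\n')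
--     lowered = [t.lower() for t in search_terms]
--
--     # merge context intervals on the fly; starts/ends are nondecreasing in i
--     merged = []  # list of [start, end) ranges, disjoint and non-touching
--     for i, line in enumerate(lines):
--         ll = line.lower()
--         if any(t in ll for t in lowered):
--             s = max(0, i - context_lines)
--             e = min(len(lines), i + context_lines + 1)
--             if s >= e:
--                 continue  # empty context window (negative context_lines)
--             if merged and s <= merged[-1][1]:
--                 merged[-1][1] = max(merged[-1][1], e)
--             else:
--                 merged.append([s, e])
--
--     if not merged:
--         return f"No direct matches found for: {', '.join(search_terms)}\n\nPage summary (first 500 chars):\n{content[:500]}..."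
--
--     pieces = []
--     prev_end = 0
--     for s, e in merged:
--         if s > prev_end:
--             pieces.append("\n[...content omitted...]\n")
--         pieces.extend(lines[s:e])
--         prev_end = e
--     return '\n'.join(pieces)
-- ===== Notes on version B (the rewrite author's own statement) =====
-- stated objective: faster
-- what changed: Replaces A's per-line index-set accumulation followed by sorting and a prev-counter walk with interval arithmetic: each matching line yields one clamped context interval, overlapping-or-touching intervals are merged on the fly into maximal disjoint ranges, and the output is emitted range by range as slices with a separator before each gap.
import Mathlib
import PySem

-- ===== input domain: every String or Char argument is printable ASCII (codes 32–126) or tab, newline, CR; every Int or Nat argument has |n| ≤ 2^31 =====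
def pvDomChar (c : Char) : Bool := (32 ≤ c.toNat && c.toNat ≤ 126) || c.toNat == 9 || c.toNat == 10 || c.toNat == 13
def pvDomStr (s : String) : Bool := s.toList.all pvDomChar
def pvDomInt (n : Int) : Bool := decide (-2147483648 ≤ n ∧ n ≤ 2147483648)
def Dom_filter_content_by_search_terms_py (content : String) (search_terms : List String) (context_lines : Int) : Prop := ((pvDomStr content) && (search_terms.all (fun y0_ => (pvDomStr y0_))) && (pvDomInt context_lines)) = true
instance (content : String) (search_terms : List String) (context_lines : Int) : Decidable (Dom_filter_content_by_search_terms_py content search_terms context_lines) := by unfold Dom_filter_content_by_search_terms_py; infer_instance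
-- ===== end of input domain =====

-- B replaces A's "accumulate a set of line indices, sort it, walk it with a prev counter" by
-- interval arithmetic: one clamped context interval per matching line, merged on the fly into
-- maximal disjoint ranges, emitted as slices (objective: faster — O(1) merge per match instead of an O(context) set update per match plus a sort).

-- ===== PORT A =====
-- inner `for term in search_terms: ... break` of A: first matching term stops the scan
def pvMatchA : List String → String → Bool
  | [], _ => false
  | t :: ts, line =>
    if PySem.Str.isIn (PySem.Str.lower t) (PySem.Str.lower line) then true
    else pvMatchA ts line

def filter_content_by_search_terms_py (content : String) (search_terms : List String) (context_lines : Int) : String :=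
  if search_terms = [] then content
  else
    -- content.split('\n'); the separator is nonempty so split? is always `some`
    let lines : List String := (PySem.Str.split? content "\n").getD []
    let relevant : PySem.Set Int :=
      (PySem.List.enumerate lines 0).foldl (fun s p =>
        if pvMatchA search_terms p.2 then
          PySem.Set.update s (PySem.List.pyRange (max 0 (p.1 - context_lines))
            (min (lines.length : Int) (p.1 + context_lines + 1)) 1)
        else s) PySem.Set.empty
    if relevant = [] then
      "No direct matches found for: " ++ PySem.Str.join ", " search_terms ++
        "\n\nPage summary (first 500 chars):\n" ++ PySem.Str.slice content none (some 500) ++ "..."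
    else
      let sorted_lines := PySem.List.sorted relevant (fun x => x)
      let fc : List String × Int := sorted_lines.foldl (fun acc line_num =>
        let acc1 := if line_num > acc.2 + 1 then acc.1 ++ ["\n[...content omitted...]\n"] else acc.1
        -- lines[line_num]: line_num is always a valid index here, so the defaulted get is exact
        (acc1 ++ [PySem.List.pyGetD lines line_num ""], line_num)) ([], -1)
      PySem.Str.join "\n" fc.1

-- ===== PORT B =====
def filter_content_by_search_terms_py_alt (content : String) (search_terms : List String) (context_lines : Int) : String :=
  if search_terms = [] then content
  else
    let lines : List String := (PySem.Str.split? content "\n").getD []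
    let lowered := search_terms.map PySem.Str.lower
    -- merge context intervals on the fly ('if merged and s <= merged[-1][1]: grow last else append')
    let merged : List (Int × Int) :=
      (PySem.List.enumerate lines 0).foldl (fun m p =>
        if lowered.any (fun t => PySem.Str.isIn t (PySem.Str.lower p.2)) then
          let s := max 0 (p.1 - context_lines)
          let e := min (lines.length : Int) (p.1 + context_lines + 1)
          if s ≥ e then m
          else
            match m.getLast? with
            | some last =>
              if s ≤ last.2 then m.dropLast ++ [(last.1, max last.2 e)]
              else m ++ [(s, e)]
            | none => m ++ [(s, e)]
        else m) []
    if merged = [] then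
      "No direct matches found for: " ++ PySem.Str.join ", " search_terms ++
        "\n\nPage summary (first 500 chars):\n" ++ PySem.Str.slice content none (some 500) ++ "..."
    else
      let pieces : List String × Int := merged.foldl (fun acc r =>
        let acc1 := if r.1 > acc.2 then acc.1 ++ ["\n[...content omitted...]\n"] else acc.1
        (acc1 ++ PySem.List.slice lines (some r.1) (some r.2), r.2)) ([], 0)
      PySem.Str.join "\n" pieces.1

-- ===== PRECONDITION & SPEC =====
def Spec_filter_content_by_search_terms_py (content : String) (search_terms : List String) (context_lines : Int) (out : String) : Prop := out = filter_content_by_search_terms_py_alt content search_terms context_lines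
instance (content : String) (search_terms : List String) (context_lines : Int) (out : String) : Decidable (Spec_filter_content_by_search_terms_py content search_terms context_lines out) := by unfold Spec_filter_content_by_search_terms_py; infer_instance

-- ===== CLAIM (what is proved, stated in full; the proofs are below) =====
def Claim_equal_filter_content_by_search_terms_py : Prop := ∀ (content : String) (search_terms : List String) (context_lines : Int), Dom_filter_content_by_search_terms_py content search_terms context_lines → Spec_filter_content_by_search_terms_py content search_terms context_lines (filter_content_by_search_terms_py content search_terms context_lines)

-- ===== LEMMAS AND PROOFS =====

-- a merged-interval list is a chain: starts bounded below, nonempty intervals, ends ≤ n, strict gaps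
def pvChain (n : Int) : Int → List (Int × Int) → Prop
  | _, [] => True
  | lo, r :: rs => lo ≤ r.1 ∧ r.1 < r.2 ∧ r.2 ≤ n ∧ pvChain n (r.2 + 1) rs

-- the indices a chain covers, flattened to a list / as a predicate
def pvFlat (m : List (Int × Int)) : List Int := m.flatMap (fun r => PySem.List.pyRange r.1 r.2 1)

def pvCov (m : List (Int × Int)) (x : Int) : Prop := ∃ r ∈ m, r.1 ≤ x ∧ x < r.2

-- A's inner term loop (first match breaks) is `any` over the terms
theorem pv_matchA_eq_any (terms : List String) (line : String) :
    pvMatchA terms line = terms.any (fun t => PySem.Str.isIn (PySem.Str.lower t) (PySem.Str.lower line)) := by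
  induction terms with
  | nil => rfl
  | cons t ts ih =>
    cases h : PySem.Str.isIn (PySem.Str.lower t) (PySem.Str.lower line) <;>
      simp [pvMatchA, ih]

-- membership in the index set A accumulates over any prefix of the enumeration
theorem pv_mem_foldS (terms : List String) (c : Int) (n : Int)
    (l : List (Int × String)) (s0 : PySem.Set Int) (x : Int) :
    x ∈ l.foldl (fun s p =>
        if pvMatchA terms p.2 then
          PySem.Set.update s (PySem.List.pyRange (max 0 (p.1 - c)) (min n (p.1 + c + 1)) 1)
        else s) s0 ↔
      x ∈ s0 ∨ ∃ p ∈ l, pvMatchA terms p.2 = true ∧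
        max 0 (p.1 - c) ≤ x ∧ x < min n (p.1 + c + 1) := by
  induction l generalizing s0 with
  | nil => simp
  | cons p l ih =>
    simp only [List.foldl_cons]
    cases h : pvMatchA terms p.2 with
    | false => rw [if_neg (by simp), ih]; simp [h]
    | true =>
      rw [if_pos (by simp), ih]
      simp [PySem.Set.mem_update, PySem.List.mem_pyRange_one, h]
      tauto

-- the accumulated index set has no duplicates
theorem pv_nodup_foldS (terms : List String) (c : Int) (n : Int)
    (l : List (Int × String)) (s0 : PySem.Set Int) (h0 : s0.Nodup) :
    (l.foldl (fun s p =>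
        if pvMatchA terms p.2 then
          PySem.Set.update s (PySem.List.pyRange (max 0 (p.1 - c)) (min n (p.1 + c + 1)) 1)
        else s) s0).Nodup := by
  induction l generalizing s0 with
  | nil => exact h0
  | cons p l ih =>
    simp only [List.foldl_cons]
    cases h : pvMatchA terms p.2 with
    | false => exact ih _ (by rwa [if_neg (by simp)])
    | true => exact ih _ (by rw [if_pos (by simp)]; exact PySem.Set.nodup_update _ _ h0)

theorem pv_chain_mem (n : Int) : ∀ (lo : Int) (m : List (Int × Int)), pvChain n lo m →
    ∀ r ∈ m, lo ≤ r.1 ∧ r.1 < r.2 ∧ r.2 ≤ n := by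
  intro lo m
  induction m generalizing lo with
  | nil => simp
  | cons q qs ih =>
    rintro ⟨h1, h2, h3, h4⟩ r hr
    rcases List.mem_cons.1 hr with rfl | hr
    · exact ⟨h1, h2, h3⟩
    · have := ih (q.2 + 1) h4 r hr; omega

theorem pv_chain_last_lb (n : Int) : ∀ (lo : Int) (m : List (Int × Int)), pvChain n lo m →
    ∀ last ∈ m.getLast?, lo ≤ last.1 := by
  intro lo m
  induction m generalizing lo with
  | nil => simp
  | cons q qs ih =>
    rintro ⟨h1, h2, h3, h4⟩ last hl
    cases qs with
    | nil => simp at hl; subst hl; omega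
    | cons a as =>
      rw [List.getLast?_cons_cons] at hl
      have := ih (q.2 + 1) h4 last hl; omega

theorem pv_chain_grow (n : Int) (s' e' : Int) : ∀ (lo : Int) (init : List (Int × Int)) (b : Int),
    pvChain n lo (init ++ [(s', b)]) → b ≤ e' → e' ≤ n → s' < e' →
    pvChain n lo (init ++ [(s', e')]) := by
  intro lo init
  induction init generalizing lo with
  | nil => rintro b ⟨h1, h2, h3, _⟩ hb hn hse; exact ⟨h1, hse, hn, trivial⟩
  | cons q qs ih =>
    rintro b ⟨h1, h2, h3, h4⟩ hb hn hse
    exact ⟨h1, h2, h3, ih (q.2 + 1) b h4 hb hn hse⟩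

theorem pv_chain_append (n : Int) (s' e' : Int) : ∀ (lo : Int) (m : List (Int × Int)),
    pvChain n lo m → (∀ last ∈ m.getLast?, last.2 < s') → lo ≤ s' → s' < e' → e' ≤ n →
    pvChain n lo (m ++ [(s', e')]) := by
  intro lo m
  induction m generalizing lo with
  | nil => intro _ _ h1 h2 h3; exact ⟨h1, h2, h3, trivial⟩
  | cons q qs ih =>
    rintro ⟨h1, h2, h3, h4⟩ hl hlo hse hn
    refine ⟨h1, h2, h3, ih (q.2 + 1) h4 ?_ ?_ hse hn⟩
    · intro last hlast
      exact hl last (by cases qs with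
        | nil => simp at hlast
        | cons a as => rwa [List.getLast?_cons_cons])
    · cases qs with
      | nil => have := hl q (by simp); omega
      | cons a as =>
        obtain ⟨last, hlast⟩ : ∃ last, (a :: as).getLast? = some last := by
          simp [List.getLast?_cons]
        have hlb := pv_chain_last_lb n (q.2 + 1) (a :: as) h4 last hlast
        have hmem := pv_chain_mem n (q.2 + 1) (a :: as) h4 last (List.mem_of_getLast? hlast)
        have := hl last (by rwa [List.getLast?_cons_cons])
        omega

theorem pv_cov_append (m : List (Int × Int)) (r : Int × Int) (x : Int) :
    pvCov (m ++ [r]) x ↔ pvCov m x ∨ (r.1 ≤ x ∧ x < r.2) := by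
  simp only [pvCov, List.mem_append, List.mem_singleton]
  constructor
  · rintro ⟨r', hr', hx1, hx2⟩
    rcases hr' with h | rfl
    · exact Or.inl ⟨r', h, hx1, hx2⟩
    · exact Or.inr ⟨hx1, hx2⟩
  · rintro (⟨r', h, hx⟩ | ⟨h1, h2⟩)
    · exact ⟨r', Or.inl h, hx⟩
    · exact ⟨r, Or.inr rfl, h1, h2⟩

theorem pv_merge_invariant (c : Int) (n : Int) (pr : Int × String → Bool) :
    ∀ (xs : List String) (i0 : Int) (m : List (Int × Int)),
    pvChain n 0 m →
    (∀ last ∈ m.getLast?, last.1 ≤ max 0 (i0 - c)) →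
    pvChain n 0 ((PySem.List.enumerate xs i0).foldl (fun (m : List (Int × Int)) (p : Int × String) =>
      if pr p then
        let s := max 0 (p.1 - c)
        let e := min n (p.1 + c + 1)
        if s ≥ e then m
        else
          match m.getLast? with
          | some last =>
            if s ≤ last.2 then m.dropLast ++ [(last.1, max last.2 e)]
            else m ++ [(s, e)]
          | none => m ++ [(s, e)]
      else m) m) ∧
      (∀ x, pvCov ((PySem.List.enumerate xs i0).foldl (fun (m : List (Int × Int)) (p : Int × String) =>
      if pr p then
        let s := max 0 (p.1 - c)
        let e := min n (p.1 + c + 1)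
        if s ≥ e then m
        else
          match m.getLast? with
          | some last =>
            if s ≤ last.2 then m.dropLast ++ [(last.1, max last.2 e)]
            else m ++ [(s, e)]
          | none => m ++ [(s, e)]
      else m) m) x ↔ pvCov m x ∨ ∃ p ∈ PySem.List.enumerate xs i0, pr p = true ∧
        max 0 (p.1 - c) ≤ x ∧ x < min n (p.1 + c + 1)) := by
  intro xs
  induction xs with
  | nil =>
    intro i0 m hch _
    rw [PySem.List.enumerate_nil]
    exact ⟨hch, fun x => by simp⟩
  | cons l ls ih =>
    intro i0 m hch hlast
    rw [PySem.List.enumerate_cons]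
    simp only [List.foldl_cons]
    set s := max 0 ((i0, l).1 - c) with hs
    set e := min n ((i0, l).1 + c + 1) with he
    -- the one-step result m₁ and the facts we need about it
    have hmono : ∀ last ∈ m.getLast?, last.1 ≤ max 0 (i0 + 1 - c) := by
      intro last hl; have := hlast last hl; omega
    by_cases hpr : pr (i0, l)
    · simp only [hpr, if_true]
      by_cases hse : s ≥ e
      · simp only [if_pos hse]
        obtain ⟨h1, h2⟩ := ih (i0 + 1) m hch hmono
        refine ⟨h1, fun x => (h2 x).trans ?_⟩
        constructor
        · rintro (h | ⟨p, hp, hh⟩)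
          · exact Or.inl h
          · exact Or.inr ⟨p, List.mem_cons_of_mem _ hp, hh⟩
        · rintro (h | ⟨p, hp, hh⟩)
          · exact Or.inl h
          · rcases List.mem_cons.1 hp with rfl | hp
            · exfalso; rw [← hs, ← he] at hh; omega
            · exact Or.inr ⟨p, hp, hh⟩
      · simp only [if_neg hse]
        replace hse : s < e := by omega
        have hs0 : 0 ≤ s := by omega
        have hen : e ≤ n := by omega
        cases hgl : m.getLast? with
        | none =>
          have hmnil : m = [] := by cases m with
            | nil => rfl
            | cons a as => simp at hgl
          subst hmnil
          have hch1 : pvChain n 0 ([] ++ [(s, e)]) := ⟨hs0, hse, hen, trivial⟩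
          have hl1 : ∀ last ∈ ([] ++ [(s, e)] : List (Int × Int)).getLast?,
              last.1 ≤ max 0 (i0 + 1 - c) := by
            intro last hl; simp at hl; subst hl; simp only [hs]; omega
          obtain ⟨h1, h2⟩ := ih (i0 + 1) _ hch1 hl1
          refine ⟨h1, fun x => (h2 x).trans ?_⟩
          rw [pv_cov_append]
          constructor
          · rintro ((h | h) | ⟨p, hp, hh⟩)
            · exact Or.inl h
            · exact Or.inr ⟨(i0, l), List.mem_cons_self .., hpr, h⟩
            · exact Or.inr ⟨p, List.mem_cons_of_mem _ hp, hh⟩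
          · rintro (h | ⟨p, hp, hh⟩)
            · exact Or.inl (Or.inl h)
            · rcases List.mem_cons.1 hp with rfl | hp
              · exact Or.inl (Or.inr hh.2)
              · exact Or.inr ⟨p, hp, hh⟩
        | some last =>
          obtain ⟨init, rfl⟩ := List.getLast?_eq_some_iff.1 hgl
          have hlmem := pv_chain_mem n 0 _ hch last (by simp)
          have hlast' : last.1 ≤ s := by
            have := hlast last (by rw [List.getLast?_concat]; rfl); omega
          by_cases hm : s ≤ last.2
          · simp only [if_pos hm, List.dropLast_concat]
            have hch1 : pvChain n 0 (init ++ [(last.1, max last.2 e)]) := by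
              refine pv_chain_grow n last.1 (max last.2 e) 0 init last.2 ?_ (by omega) (by omega) (by omega)
              simpa using hch
            have hl1 : ∀ la ∈ (init ++ [(last.1, max last.2 e)]).getLast?,
                la.1 ≤ max 0 (i0 + 1 - c) := by
              intro la hl; rw [List.getLast?_concat] at hl; simp at hl; subst hl; omega
            obtain ⟨h1, h2⟩ := ih (i0 + 1) _ hch1 hl1
            refine ⟨h1, fun x => (h2 x).trans ?_⟩
            rw [pv_cov_append]
            have hcovm : pvCov (init ++ [last]) x ↔ pvCov init x ∨ (last.1 ≤ x ∧ x < last.2) := by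
              have := pv_cov_append init last x; simpa using this
            constructor
            · rintro ((h | h) | ⟨p, hp, hh⟩)
              · exact Or.inl (hcovm.2 (Or.inl h))
              · simp only at h
                by_cases hx : x < last.2
                · exact Or.inl (hcovm.2 (Or.inr ⟨h.1, hx⟩))
                · exact Or.inr ⟨(i0, l), List.mem_cons_self .., hpr, by omega, by omega⟩
              · exact Or.inr ⟨p, List.mem_cons_of_mem _ hp, hh⟩
            · rintro (h | ⟨p, hp, hh⟩)
              · rcases hcovm.1 h with h | h
                · exact Or.inl (Or.inl h)
                · exact Or.inl (Or.inr ⟨h.1, by simp; omega⟩)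
              · rcases List.mem_cons.1 hp with rfl | hp
                · exact Or.inl (Or.inr ⟨by omega, by simp; omega⟩)
                · exact Or.inr ⟨p, hp, hh⟩
          · simp only [if_neg hm]
            replace hm : last.2 < s := by omega
            have hch1 : pvChain n 0 ((init ++ [last]) ++ [(s, e)]) := by
              refine pv_chain_append n s e 0 (init ++ [last]) hch ?_ (by omega) hse hen
              intro la hl; rw [List.getLast?_concat] at hl; simp at hl; subst hl; omega
            have hl1 : ∀ la ∈ ((init ++ [last]) ++ [(s, e)]).getLast?,
                la.1 ≤ max 0 (i0 + 1 - c) := by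
              intro la hl; rw [List.getLast?_concat] at hl; simp at hl; subst hl
              simp only [hs]; omega
            obtain ⟨h1, h2⟩ := ih (i0 + 1) _ hch1 hl1
            refine ⟨h1, fun x => (h2 x).trans ?_⟩
            rw [pv_cov_append]
            constructor
            · rintro ((h | h) | ⟨p, hp, hh⟩)
              · exact Or.inl h
              · exact Or.inr ⟨(i0, l), List.mem_cons_self .., hpr, h⟩
              · exact Or.inr ⟨p, List.mem_cons_of_mem _ hp, hh⟩
            · rintro (h | ⟨p, hp, hh⟩)
              · exact Or.inl (Or.inl h)
              · rcases List.mem_cons.1 hp with rfl | hp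
                · exact Or.inl (Or.inr hh.2)
                · exact Or.inr ⟨p, hp, hh⟩
    · simp only [hpr, if_false, Bool.false_eq_true]
      obtain ⟨h1, h2⟩ := ih (i0 + 1) m hch hmono
      refine ⟨h1, fun x => (h2 x).trans ?_⟩
      constructor
      · rintro (h | ⟨p, hp, hh⟩)
        · exact Or.inl h
        · exact Or.inr ⟨p, List.mem_cons_of_mem _ hp, hh⟩
      · rintro (h | ⟨p, hp, hh⟩)
        · exact Or.inl h
        · rcases List.mem_cons.1 hp with rfl | hp
          · exact absurd hh.1 (by simp [hpr])
          · exact Or.inr ⟨p, hp, hh⟩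

theorem pv_mem_pvFlat (m : List (Int × Int)) (x : Int) : x ∈ pvFlat m ↔ pvCov m x := by
  simp [pvFlat, pvCov, PySem.List.mem_pyRange_one]

theorem pv_pvFlat_bounds (n lo : Int) (m : List (Int × Int)) (h : pvChain n lo m) :
    ∀ x ∈ pvFlat m, lo ≤ x ∧ x < n := by
  induction m generalizing lo with
  | nil => simp [pvFlat]
  | cons r rs ih =>
    obtain ⟨h1, h2, h3, h4⟩ := h
    intro x hx
    have hsplit : pvFlat (r :: rs) = PySem.List.pyRange r.1 r.2 1 ++ pvFlat rs := by simp [pvFlat]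
    rw [hsplit] at hx
    rcases List.mem_append.1 hx with hx | hx
    · rw [PySem.List.mem_pyRange_one] at hx; omega
    · have := ih (r.2 + 1) h4 x hx; omega

theorem pv_pairwise_pvFlat (n lo : Int) (m : List (Int × Int)) (h : pvChain n lo m) :
    (pvFlat m).Pairwise (· < ·) := by
  induction m generalizing lo with
  | nil => simp [pvFlat]
  | cons r rs ih =>
    obtain ⟨h1, h2, h3, h4⟩ := h
    have : pvFlat (r :: rs) = PySem.List.pyRange r.1 r.2 1 ++ pvFlat rs := by simp [pvFlat]
    rw [this, List.pairwise_append]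
    refine ⟨PySem.List.pairwise_lt_pyRange_one _ _, ih _ h4, ?_⟩
    intro x hx y hy
    rw [PySem.List.mem_pyRange_one] at hx
    have := pv_pvFlat_bounds n (r.2 + 1) rs h4 y hy
    omega

theorem pv_slice_eq_map (lines : List String) (s e : Int)
    (hs : 0 ≤ s) (hse : s ≤ e) (he : e ≤ (lines.length : Int)) :
    PySem.List.slice lines (some s) (some e) =
      (PySem.List.pyRange s e 1).map (fun j => PySem.List.pyGetD lines j "") := by
  rw [PySem.List.slice_toNat _ hs (by omega), PySem.List.pyRange_one, List.map_map]
  apply List.ext_getElem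
  · simp; omega
  · intro k hk1 hk2
    have hk : k < (e - s).toNat := by simpa using hk2
    simp only [List.getElem_take, List.getElem_drop, List.getElem_map, List.getElem_range,
      Function.comp]
    rw [PySem.List.pyGetD_eq_getElem _ _ (by omega) (by omega)]
    congr 1
    omega

theorem pv_runA_tail (lines : List String) (cnt : Nat) :
    ∀ (s : Int) (acc : List String),
    (PySem.List.pyRange s (s + cnt) 1).foldl (fun acc line_num =>
        let acc1 := if line_num > acc.2 + 1 then acc.1 ++ ["\n[...content omitted...]\n"] else acc.1
        (acc1 ++ [PySem.List.pyGetD lines line_num ""], line_num)) (acc, s - 1) =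
      (acc ++ (PySem.List.pyRange s (s + cnt) 1).map (fun j => PySem.List.pyGetD lines j ""),
        s - 1 + cnt) := by
  induction cnt with
  | zero => intro s acc; simp
  | succ k ih =>
    intro s acc
    rw [PySem.List.pyRange_one_cons (by push_cast; omega)]
    simp only [List.foldl_cons, List.map_cons]
    rw [if_neg (by omega)]
    have hr : s + ((k + 1 : Nat) : Int) = (s + 1) + (k : Int) := by push_cast; ring
    rw [hr]
    rw [show ((acc ++ [PySem.List.pyGetD lines s ""], s) : List String × Int) =
        (acc ++ [PySem.List.pyGetD lines s ""], (s + 1) - 1) from by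
      rw [Prod.mk.injEq]; exact ⟨rfl, by ring⟩]
    rw [show ((k : Int) : Int) = ((k : Nat) : Int) from rfl, ih (s + 1)]
    rw [Prod.mk.injEq]
    exact ⟨by simp, by push_cast; ring⟩

theorem pv_runA (lines : List String) (s e : Int) (acc : List String) (p : Int)
    (hse : s < e) :
    (PySem.List.pyRange s e 1).foldl (fun acc line_num =>
        let acc1 := if line_num > acc.2 + 1 then acc.1 ++ ["\n[...content omitted...]\n"] else acc.1
        (acc1 ++ [PySem.List.pyGetD lines line_num ""], line_num)) (acc, p) =
      ((if s > p + 1 then acc ++ ["\n[...content omitted...]\n"] else acc) ++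
        (PySem.List.pyRange s e 1).map (fun j => PySem.List.pyGetD lines j ""), e - 1) := by
  rw [PySem.List.pyRange_one_cons hse]
  simp only [List.foldl_cons, List.map_cons]
  set acc1 := if s > p + 1 then acc ++ ["\n[...content omitted...]\n"] else acc with hacc1
  rw [show ((acc1 ++ [PySem.List.pyGetD lines s ""], s) : List String × Int) =
      (acc1 ++ [PySem.List.pyGetD lines s ""], (s + 1) - 1) from by
    rw [Prod.mk.injEq]; exact ⟨rfl, by ring⟩]
  have he : e = (s + 1) + ((e - s - 1).toNat : Int) := by omega
  rw [he, pv_runA_tail]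
  rw [Prod.mk.injEq]
  exact ⟨by simp, by omega⟩

theorem pv_emit (lines : List String) (n : Int) (hn : n = (lines.length : Int))
    (m : List (Int × Int)) : ∀ (lo : Int) (acc : List String) (pe : Int),
    pvChain n lo m → 0 ≤ lo → pe ≤ lo →
    ((pvFlat m).foldl (fun acc line_num =>
        let acc1 := if line_num > acc.2 + 1 then acc.1 ++ ["\n[...content omitted...]\n"] else acc.1
        (acc1 ++ [PySem.List.pyGetD lines line_num ""], line_num)) (acc, pe - 1)).1 =
      (m.foldl (fun acc r =>
        let acc1 := if r.1 > acc.2 then acc.1 ++ ["\n[...content omitted...]\n"] else acc.1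
        (acc1 ++ PySem.List.slice lines (some r.1) (some r.2), r.2)) (acc, pe)).1 := by
  induction m with
  | nil => intro lo acc pe _ _ _; simp [pvFlat]
  | cons r rs ih =>
    intro lo acc pe hch hlo hpe
    obtain ⟨h1, h2, h3, h4⟩ := hch
    have hsplit : pvFlat (r :: rs) = PySem.List.pyRange r.1 r.2 1 ++ pvFlat rs := by simp [pvFlat]
    rw [hsplit, List.foldl_append, List.foldl_cons]
    rw [pv_runA lines r.1 r.2 acc (pe - 1) h2]
    rw [pv_slice_eq_map lines r.1 r.2 (by omega) (by omega) (by omega)]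
    rw [show pe - 1 + 1 = pe from by ring]
    exact ih (r.2 + 1) _ r.2 h4 (by omega) (by omega)

-- ===== VERDICT (by name: the statement is the Claim_ definition above) =====
set_option maxHeartbeats 2000000 in
theorem filter_content_by_search_terms_py_spec : Claim_equal_filter_content_by_search_terms_py := by
  intro content terms c _
  unfold Spec_filter_content_by_search_terms_py filter_content_by_search_terms_py
    filter_content_by_search_terms_py_alt
  by_cases hts : terms = []
  · simp [hts]
  · simp only [if_neg hts]
    set lines : List String := (PySem.Str.split? content "\n").getD [] with hlines
    set n : Int := (lines.length : Int) with hn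
    set pr : Int × String → Bool := fun p =>
      (terms.map PySem.Str.lower).any (fun t => PySem.Str.isIn t (PySem.Str.lower p.2)) with hpr
    set S : PySem.Set Int :=
      (PySem.List.enumerate lines 0).foldl (fun s p =>
        if pvMatchA terms p.2 then
          PySem.Set.update s (PySem.List.pyRange (max 0 (p.1 - c)) (min n (p.1 + c + 1)) 1)
        else s) PySem.Set.empty with hS
    set merged : List (Int × Int) :=
      (PySem.List.enumerate lines 0).foldl (fun (m : List (Int × Int)) (p : Int × String) =>
        if pr p then
          let s := max 0 (p.1 - c)
          let e := min n (p.1 + c + 1)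
          if s ≥ e then m
          else
            match m.getLast? with
            | some last =>
              if s ≤ last.2 then m.dropLast ++ [(last.1, max last.2 e)]
              else m ++ [(s, e)]
            | none => m ++ [(s, e)]
        else m) [] with hmerged
    obtain ⟨hch, hcov⟩ := pv_merge_invariant c n pr lines 0 [] trivial (by simp)
    rw [← hmerged] at hch hcov
    have hpr_eq : ∀ (p : Int × String), pr p = pvMatchA terms p.2 := by
      intro p
      rw [pv_matchA_eq_any]
      show (terms.map PySem.Str.lower).any (fun t => PySem.Str.isIn t (PySem.Str.lower p.2)) = _
      rw [List.any_map]
      rfl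
    have hmemS : ∀ x, x ∈ S ↔ pvCov merged x := by
      intro x
      rw [hS, pv_mem_foldS, hcov x]
      simp [pvCov, hpr_eq, PySem.Set.empty]
    have hempty : (S = []) ↔ (merged = []) := by
      constructor
      · intro h
        cases hm : merged with
        | nil => rfl
        | cons r rest =>
          exfalso
          have hr := pv_chain_mem n 0 merged hch r (by rw [hm]; exact List.mem_cons_self ..)
          have : r.1 ∈ S := (hmemS r.1).2 ⟨r, by rw [hm]; exact List.mem_cons_self .., le_refl _, hr.2.1⟩
          rw [h] at this
          exact List.not_mem_nil this
      · intro h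
        rw [List.eq_nil_iff_forall_not_mem]
        intro x hx
        rcases (hmemS x).1 hx with ⟨r, hr, _⟩
        rw [h] at hr
        exact List.not_mem_nil hr
    by_cases h0 : S = []
    · rw [if_pos h0, if_pos (hempty.1 h0)]
    · rw [if_neg h0, if_neg (fun hc => h0 (hempty.2 hc))]
      have hSnodup : S.Nodup := by rw [hS]; exact pv_nodup_foldS terms c n _ _ List.nodup_nil
      have hflatpw := pv_pairwise_pvFlat n 0 merged hch
      have hflatnodup : (pvFlat merged).Nodup := hflatpw.imp ne_of_lt
      have hsorted : PySem.List.sorted S (fun x => x) = pvFlat merged := by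
        apply PySem.List.sorted_eq_of_perm_of_pairwise_lt
        · rw [List.perm_ext_iff_of_nodup hflatnodup hSnodup]
          intro a
          rw [pv_mem_pvFlat, hmemS a]
        · exact hflatpw
      congr 1
      rw [hsorted]
      rw [show (([], -1) : List String × Int) = (([] : List String), (0 : Int) - 1) from by norm_num]
      exact pv_emit lines n hn merged 0 [] 0 hch (le_refl 0) (le_refl 0)
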